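-- pv_equiv track=rewrite | github.com/lixiang2017/leetcode | leetcode-cn/2293.0_Min_Max_Game.py | minMaxGame
-- ===== SOURCE A (Python) =====
-- from typing import List
--
-- def minMaxGame(nums: List[int]) -> int:
--
--     def recursive(nums: List[int]) -> int:
--         if len(nums) == 1:
--             return nums[0]
--         i = 0
--         newNums = []
--         while 2 * i + 1 < len(nums):
--             if i & 1:
--                 newNums.append(max(nums[2 * i], nums[2 * i + 1]))
--             else:
--                 newNums.append(min(nums[2 * i], nums[2 * i + 1]))
--             i += 1
--         return recursive(newNums)
--
--     return recursive(nums)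
-- ===== SOURCE B (Python) =====
-- def minMaxGame(nums):
--     while len(nums) > 1:
--         nums = [min(nums[2 * i], nums[2 * i + 1]) if i % 2 == 0
--                 else max(nums[2 * i], nums[2 * i + 1])
--                 for i in range(len(nums) // 2)]
--     return nums[0]
-- ===== Notes on version B (the rewrite author's own statement) =====
-- stated objective: idiomatic
-- what changed: Replaces the inner recursive helper that appends pairwise min/max through a hand-rolled while-over-index loop with an iterative while-loop that rebuilds the list as a comprehension over range(len//2) and returns nums[0].
import Mathlib
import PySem

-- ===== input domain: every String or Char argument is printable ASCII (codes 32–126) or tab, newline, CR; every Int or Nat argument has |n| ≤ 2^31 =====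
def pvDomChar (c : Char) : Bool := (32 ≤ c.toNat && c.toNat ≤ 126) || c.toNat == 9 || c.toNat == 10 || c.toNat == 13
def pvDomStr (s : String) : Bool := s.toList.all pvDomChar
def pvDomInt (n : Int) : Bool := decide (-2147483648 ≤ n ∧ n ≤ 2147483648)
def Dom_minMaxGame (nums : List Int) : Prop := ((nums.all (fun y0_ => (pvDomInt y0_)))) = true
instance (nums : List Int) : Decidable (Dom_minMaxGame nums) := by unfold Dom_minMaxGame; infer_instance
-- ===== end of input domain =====

-- ===== PORT A =====
-- B is an idiomatic iterative rewrite of A's recursive helper; equal to A on all nonempty lists.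
-- index accesses nums[2*i], nums[2*i+1] are always in range (2*i+1 < len), so .getD 0 is exact
def aLoop (nums : List Int) (i : Nat) (newNums : List Int) : List Int :=
  if 2 * i + 1 < nums.length then
    aLoop nums (i + 1) (newNums ++ [if i % 2 = 1
      then max ((PySem.List.pyGet? nums ((2 * i : Nat) : Int)).getD 0)
               ((PySem.List.pyGet? nums ((2 * i + 1 : Nat) : Int)).getD 0)
      else min ((PySem.List.pyGet? nums ((2 * i : Nat) : Int)).getD 0)
               ((PySem.List.pyGet? nums ((2 * i + 1 : Nat) : Int)).getD 0)])
  else newNums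
termination_by nums.length - i

-- the recursion of A's helper, with fuel = nums.length as a pure totality guard (each level halves the
-- length, so the fuel never runs out on the inputs where Python A returns); on the empty list Python A
-- recurses forever (RecursionError); excluded by Pre_; the port returns a default there
def aRec (fuel : Nat) (nums : List Int) : Int :=
  match fuel with
  | 0 => (PySem.List.pyGet? nums 0).getD 0
  | f + 1 =>
    if 1 < nums.length then aRec f (aLoop nums 0 [])
    else (PySem.List.pyGet? nums 0).getD 0

def minMaxGame (nums : List Int) : Int := aRec nums.length nums

-- ===== PORT B =====
def bStep (nums : List Int) : List Int :=
  (List.range (nums.length / 2)).map (fun i =>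
    if i % 2 = 0
      then min ((PySem.List.pyGet? nums ((2 * i : Nat) : Int)).getD 0)
               ((PySem.List.pyGet? nums ((2 * i + 1 : Nat) : Int)).getD 0)
      else max ((PySem.List.pyGet? nums ((2 * i : Nat) : Int)).getD 0)
               ((PySem.List.pyGet? nums ((2 * i + 1 : Nat) : Int)).getD 0))

-- B's while loop, with the same fuel = nums.length totality guard (the list halves each pass);
-- on the empty list Python B raises IndexError reading the first element; excluded by Pre_
def bRec (fuel : Nat) (nums : List Int) : Int :=
  match fuel with
  | 0 => (PySem.List.pyGet? nums 0).getD 0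
  | f + 1 =>
    if 1 < nums.length then bRec f (bStep nums)
    else (PySem.List.pyGet? nums 0).getD 0

def minMaxGame_alt (nums : List Int) : Int := bRec nums.length nums

-- ===== PRECONDITION & SPEC =====
-- Pre_ excludes only the empty list, on which A hits unbounded recursion (RecursionError) and B raises IndexError
def Pre_minMaxGame (nums : List Int) : Prop := nums ≠ []
instance (nums : List Int) : Decidable (Pre_minMaxGame nums) := by unfold Pre_minMaxGame; infer_instance
def pvWitness_minMaxGame : List Int := ([1, 2, 3, 4])

def Spec_minMaxGame (nums : List Int) (out : Int) : Prop := out = minMaxGame_alt nums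
instance (nums : List Int) (out : Int) : Decidable (Spec_minMaxGame nums out) := by unfold Spec_minMaxGame; infer_instance

-- ===== CLAIM (what is proved, stated in full; the proofs are below) =====
def Claim_equal_minMaxGame : Prop := ∀ (nums : List Int), Dom_minMaxGame nums → Pre_minMaxGame nums → Spec_minMaxGame nums (minMaxGame nums)

-- ===== LEMMAS AND PROOFS =====

theorem aLoop_spec (nums : List Int) (i : Nat) (acc : List Int) :
    aLoop nums i acc = acc ++ (List.range (nums.length / 2 - i)).map (fun j =>
      if (i + j) % 2 = 1
        then max ((PySem.List.pyGet? nums ((2 * (i + j) : Nat) : Int)).getD 0)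
                 ((PySem.List.pyGet? nums ((2 * (i + j) + 1 : Nat) : Int)).getD 0)
        else min ((PySem.List.pyGet? nums ((2 * (i + j) : Nat) : Int)).getD 0)
                 ((PySem.List.pyGet? nums ((2 * (i + j) + 1 : Nat) : Int)).getD 0)) := by
  fun_induction aLoop with
  | case1 i acc h ih =>
    simp only [dite_eq_ite] at ih
    rw [ih]
    have hr : nums.length / 2 - i = (nums.length / 2 - (i + 1)) + 1 := by omega
    rw [hr, List.range_succ_eq_map]
    simp only [List.map_cons, List.map_map, List.append_assoc, List.singleton_append]
    apply congrArg (acc ++ ·)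
    congr 1
    apply List.map_congr_left
    intro a _
    simp only [Function.comp_apply, Nat.succ_eq_add_one]
    have h1 : i + 1 + a = i + (a + 1) := by omega
    rw [h1]
  | case2 i acc h =>
    have : nums.length / 2 - i = 0 := by omega
    simp [this]

theorem step_eq (nums : List Int) : aLoop nums 0 [] = bStep nums := by
  rw [aLoop_spec, bStep]
  simp only [Nat.zero_add, Nat.sub_zero, List.nil_append]
  apply List.map_congr_left
  intro j _
  rcases Nat.mod_two_eq_zero_or_one j with h | h <;> simp [h]

theorem rec_eq (fuel : Nat) (nums : List Int) : aRec fuel nums = bRec fuel nums := by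
  induction fuel generalizing nums with
  | zero => rfl
  | succ f ih =>
    simp only [aRec, bRec]
    split_ifs with h
    · rw [step_eq, ih]
    · rfl

theorem ports_eq (nums : List Int) : minMaxGame nums = minMaxGame_alt nums := by
  simp only [minMaxGame, minMaxGame_alt]
  exact rec_eq nums.length nums

-- ===== VERDICT (by name: the statement is the Claim_ definition above) =====
theorem minMaxGame_spec : Claim_equal_minMaxGame := by
  intro nums _ _
  unfold Spec_minMaxGame
  exact ports_eq nums
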